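-- pv_equiv track=rewrite | github.com/voip39/voicegpt_sce | agent/answer_synthesis.py | synthesize_broad_memory
-- ===== SOURCE A (Python) =====
-- from typing import Iterable, Mapping, Sequence
--
-- def _normalize_value(value) -> str:
--     if value is None:
--         return ""
--     return str(value).strip()
--
-- def _join_natural(parts: Sequence[str]) -> str:
--     parts = [p.strip() for p in parts if p and p.strip()]
--     if not parts:
--         return ""
--     if len(parts) == 1:
--         return parts[0]
--     if len(parts) == 2:
--         return f"{parts[0]} and {parts[1]}"
--     return ", ".join(parts[:-1]) + f", and {parts[-1]}"
--
-- def _dedupe_pairs(items: Iterable[tuple[str, str]]) -> list[tuple[str, str]]: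
--     seen: set[tuple[str, str]] = set()
--     result: list[tuple[str, str]] = []
--
--     for key, value in items:
--         k = (key or "").strip()
--         v = _normalize_value(value)
--         if not k or not v:
--             continue
--         pair = (k, v)
--         if pair in seen:
--             continue
--         seen.add(pair)
--         result.append(pair)
--
--     return result
--
-- def synthesize_broad_memory(
--     items: list[tuple[str, str]],
--     limit: int = 4,
-- ) -> str:
--     """
--     Broad shortlist answer.
--     Input is expected to be already relevance-ranked upstream.
--     Example:
--       You like blue, tea, jazz, and dune.
--     """
--     deduped = _dedupe_pairs(items)
--
--     if not deduped:
--         return "I could not find anything relevant in memory."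
--
--     values: list[str] = []
--     seen_values: set[str] = set()
--
--     for _key, value in deduped:
--         v = _normalize_value(value)
--         lv = v.lower()
--         if lv in seen_values:
--             continue
--         seen_values.add(lv)
--         values.append(v)
--         if len(values) >= limit:
--             break
--
--     if not values:
--         return "I could not find anything relevant in memory."
--
--     if len(values) == 1:
--         return f"You like {values[0]}."
--
--     return f"You like {_join_natural(values)}."
-- ===== SOURCE B (Python) =====
-- def synthesize_broad_memory(items, limit=4):
--     # One fused pass: pair-dedup and case-insensitive value-dedup in the same loop.
--     seen_pairs = set()
--     seen_values = set()
--     values = []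
--     for key, value in items:
--         k = key.strip()
--         v = value.strip()
--         if not k or not v:
--             continue
--         if (k, v) in seen_pairs:
--             continue
--         seen_pairs.add((k, v))
--         lv = v.lower()
--         if lv in seen_values:
--             continue
--         seen_values.add(lv)
--         values.append(v)
--         if len(values) >= limit:
--             break
--     if not values:
--         return "I could not find anything relevant in memory."
--     if len(values) == 1:
--         return f"You like {values[0]}."
--     if len(values) == 2:
--         return f"You like {values[0]} and {values[1]}."
--     return "You like " + ", ".join(values[:-1]) + f", and {values[-1]}."
-- ===== Notes on version B (the rewrite author's own statement) =====
-- stated objective: simpler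
-- what changed: B fuses A's two-stage pipeline (_dedupe_pairs building an intermediate deduped list, then a second value-dedup loop over it) into a single pass over items that maintains the pair set and the lowercase-value set simultaneously, appending values directly and breaking at the limit, with the three-way formatting inlined.
import Mathlib
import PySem

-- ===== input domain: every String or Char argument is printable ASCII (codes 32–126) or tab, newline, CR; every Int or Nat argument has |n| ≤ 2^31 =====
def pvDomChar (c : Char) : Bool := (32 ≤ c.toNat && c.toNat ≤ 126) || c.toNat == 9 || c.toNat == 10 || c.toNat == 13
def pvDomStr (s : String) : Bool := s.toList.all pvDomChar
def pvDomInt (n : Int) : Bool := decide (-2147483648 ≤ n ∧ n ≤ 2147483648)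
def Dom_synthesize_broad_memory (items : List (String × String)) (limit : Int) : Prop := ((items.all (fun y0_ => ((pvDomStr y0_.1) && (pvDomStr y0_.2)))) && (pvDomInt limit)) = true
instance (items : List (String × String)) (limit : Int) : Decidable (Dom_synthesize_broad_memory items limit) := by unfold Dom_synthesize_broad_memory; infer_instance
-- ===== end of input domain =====

-- B fuses A's two passes (_dedupe_pairs, then a value-dedup loop) into one loop that
-- maintains the pair set and the lowercase value set together; simpler, same return value.

-- ===== PORT A =====

-- _normalize_value: the argument is a str here (tuple[str, str]), so the None branch never fires
def normalizeValue (value : String) : String := PySem.Str.strip value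

-- _join_natural
def joinNatural (parts : List String) : String :=
  -- parts = [p.strip() for p in parts if p and p.strip()]
  let ps := (parts.filter (fun p => !(p == "") && !(PySem.Str.strip p == ""))).map PySem.Str.strip
  if ps = [] then ""
  else if ps.length = 1 then PySem.List.pyGetD ps 0 ""
  else if ps.length = 2 then PySem.List.pyGetD ps 0 "" ++ " and " ++ PySem.List.pyGetD ps 1 ""
  else PySem.Str.join ", " (PySem.List.slice ps none (some (-1))) ++ ", and " ++ PySem.List.pyGetD ps (-1) ""

-- _dedupe_pairs (loop over items carrying seen set and result list)
def dedupePairs : List (String × String) → PySem.Set (String × String) → List (String × String) → List (String × String)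
  | [], _, result => result
  | (key, value) :: rest, seen, result =>
    -- k = (key or "").strip(): 'key or ""' is key unless key = "", and "".strip() = "" — identical
    let k := PySem.Str.strip key
    let v := normalizeValue value
    if k = "" ∨ v = "" then dedupePairs rest seen result
    else if PySem.Set.contains seen (k, v) then dedupePairs rest seen result
    else dedupePairs rest (PySem.Set.add seen (k, v)) (result ++ [(k, v)])

-- the second loop of A (value-level dedup with break on limit)
def collectA (limit : Int) : List (String × String) → PySem.Set String → List String → List String
  | [], _, values => values
  | (_, value) :: rest, seenValues, values =>
    let v := normalizeValue value
    let lv := PySem.Str.lower v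
    if PySem.Set.contains seenValues lv then collectA limit rest seenValues values
    else
      let values' := values ++ [v]
      if (values'.length : Int) ≥ limit then values'
      else collectA limit rest (PySem.Set.add seenValues lv) values'

def synthesize_broad_memory (items : List (String × String)) (limit : Int) : String :=
  let deduped := dedupePairs items PySem.Set.empty []
  if deduped = [] then "I could not find anything relevant in memory."
  else
    let values := collectA limit deduped PySem.Set.empty []
    if values = [] then "I could not find anything relevant in memory."
    else if values.length = 1 then "You like " ++ PySem.List.pyGetD values 0 "" ++ "."
    else "You like " ++ joinNatural values ++ "."

-- ===== PORT B =====

-- the single fused loop of B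
def collectB (limit : Int) : List (String × String) → PySem.Set (String × String) → PySem.Set String → List String → List String
  | [], _, _, values => values
  | (key, value) :: rest, seenPairs, seenValues, values =>
    let k := PySem.Str.strip key
    let v := PySem.Str.strip value
    if k = "" ∨ v = "" then collectB limit rest seenPairs seenValues values
    else if PySem.Set.contains seenPairs (k, v) then collectB limit rest seenPairs seenValues values
    else
      let seenPairs' := PySem.Set.add seenPairs (k, v)
      let lv := PySem.Str.lower v
      if PySem.Set.contains seenValues lv then collectB limit rest seenPairs' seenValues values
      else
        let values' := values ++ [v]
        if (values'.length : Int) ≥ limit then values'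
        else collectB limit rest seenPairs' (PySem.Set.add seenValues lv) values'

def synthesize_broad_memory_alt (items : List (String × String)) (limit : Int) : String :=
  let values := collectB limit items PySem.Set.empty PySem.Set.empty []
  if values = [] then "I could not find anything relevant in memory."
  else if values.length = 1 then "You like " ++ PySem.List.pyGetD values 0 "" ++ "."
  else if values.length = 2 then "You like " ++ PySem.List.pyGetD values 0 "" ++ " and " ++ PySem.List.pyGetD values 1 "" ++ "."
  else "You like " ++ PySem.Str.join ", " (PySem.List.slice values none (some (-1))) ++ ", and " ++ PySem.List.pyGetD values (-1) "" ++ "."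

-- ===== PRECONDITION & SPEC =====
def Spec_synthesize_broad_memory (items : List (String × String)) (limit : Int) (out : String) : Prop := out = synthesize_broad_memory_alt items limit
instance (items : List (String × String)) (limit : Int) (out : String) : Decidable (Spec_synthesize_broad_memory items limit out) := by unfold Spec_synthesize_broad_memory; infer_instance

-- ===== CLAIM (what is proved, stated in full; the proofs are below) =====
def Claim_equal_synthesize_broad_memory : Prop := ∀ (items : List (String × String)) (limit : Int), Dom_synthesize_broad_memory items limit → Spec_synthesize_broad_memory items limit (synthesize_broad_memory items limit)

-- ===== LEMMAS AND PROOFS =====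

-- Python's strip is idempotent
theorem dw_idem {α} (p : α → Bool) (l : List α) :
    List.dropWhile p (List.dropWhile p l) = List.dropWhile p l := by
  rw [List.dropWhile_eq_self_iff]
  intro hl
  have h := List.head?_dropWhile_not p l
  rw [List.head?_eq_getElem?, List.getElem?_eq_getElem hl] at h
  exact fun hc => by simp [hc] at h

theorem chars_strip_idem (cs : List Char) :
    PySem.Chars.strip (PySem.Chars.strip cs) = PySem.Chars.strip cs := by
  simp only [PySem.Chars.strip, PySem.Chars.rstrip, PySem.Chars.lstrip]
  set p := PySem.Chars.isspace
  set y := List.dropWhile p cs with hy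
  set r := (List.dropWhile p y.reverse).reverse with hr
  have hpref : r <+: y := by
    rw [hr, ← List.reverse_reverse (as := y)]
    exact List.reverse_prefix.mpr (by simpa using List.dropWhile_suffix (l := y.reverse) p)
  have hyfix : List.dropWhile p y = y := dw_idem p cs
  have hr_fix : List.dropWhile p r = r := by
    rw [List.dropWhile_eq_self_iff]
    intro hl
    have hlen : (0:ℕ) < y.length := lt_of_lt_of_le hl hpref.length_le
    have h0 : r[0] = y[0] := List.IsPrefix.getElem hpref hl
    rw [h0]
    exact (List.dropWhile_eq_self_iff.mp hyfix) hlen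
  rw [hr_fix, List.reverse_reverse, dw_idem]

theorem str_strip_idem (s : String) :
    PySem.Str.strip (PySem.Str.strip s) = PySem.Str.strip s := by
  rw [← String.toList_inj]
  simp [PySem.Str.toList_strip, chars_strip_idem]

-- the accumulator of _dedupe_pairs only prepends
theorem dedupePairs_acc (xs : List (String × String)) (seen : PySem.Set (String × String))
    (res : List (String × String)) :
    dedupePairs xs seen res = res ++ dedupePairs xs seen [] := by
  induction xs generalizing seen res with
  | nil => simp [dedupePairs]
  | cons hd tl ih =>
    obtain ⟨key, value⟩ := hd
    simp only [dedupePairs]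
    split_ifs with h1 h2
    · exact ih _ _
    · exact ih _ _
    · rw [ih _ (res ++ [_]), ih _ ([] ++ [_])]
      simp

theorem collectB_eq (xs : List (String × String)) (limit : Int)
    (seenP : PySem.Set (String × String)) (seenV : PySem.Set String) (values : List String) :
    collectB limit xs seenP seenV values = collectA limit (dedupePairs xs seenP []) seenV values := by
  induction xs generalizing seenP seenV values with
  | nil => simp [collectB, dedupePairs, collectA]
  | cons hd tl ih =>
    obtain ⟨key, value⟩ := hd
    simp only [collectB, dedupePairs, normalizeValue]
    split_ifs with h1 h2 h3 h4
    · exact ih _ _ _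
    · exact ih _ _ _
    all_goals
      simp only [List.nil_append]
      rw [dedupePairs_acc tl _ [(PySem.Str.strip key, PySem.Str.strip value)], List.singleton_append]
    · simp only [collectA, normalizeValue, str_strip_idem, h3, if_true]
      exact ih _ _ _
    · have h3' : PySem.Str.lower (PySem.Str.strip value) ∉ seenV := by simpa using h3
      have h4' : limit ≤ (values.length : Int) + 1 := by simpa using h4
      simp only [collectA, normalizeValue, str_strip_idem]
      simp [h3', h4']
    · simp only [collectA, normalizeValue, str_strip_idem]
      simp only [h3]
      simp only [if_neg h4]
      exact ih _ _ _

-- every value in the deduped list is a nonempty stripped string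
theorem dedupePairs_clean_gen (xs : List (String × String)) (seen : PySem.Set (String × String))
    (res : List (String × String)) (hres : ∀ p ∈ res, p.2 ≠ "" ∧ PySem.Str.strip p.2 = p.2) :
    ∀ p ∈ dedupePairs xs seen res, p.2 ≠ "" ∧ PySem.Str.strip p.2 = p.2 := by
  induction xs generalizing seen res with
  | nil => simpa [dedupePairs] using hres
  | cons hd tl ih =>
    obtain ⟨key, value⟩ := hd
    simp only [dedupePairs, normalizeValue]
    split_ifs with h1 h2
    · exact ih _ _ hres
    · exact ih _ _ hres
    · apply ih
      intro p hp
      rcases List.mem_append.mp hp with h | h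
      · exact hres p h
      · push Not at h1
        rcases List.mem_singleton.mp h with rfl
        exact ⟨h1.2, str_strip_idem value⟩

theorem dedupePairs_clean (xs : List (String × String)) (seen : PySem.Set (String × String))
    {p : String × String} (hp : p ∈ dedupePairs xs seen []) :
    p.2 ≠ "" ∧ PySem.Str.strip p.2 = p.2 :=
  dedupePairs_clean_gen xs seen [] (by simp) p hp

-- collectA preserves that property
theorem collectA_clean (limit : Int) (xs : List (String × String)) (seenV : PySem.Set String)
    (values : List String)
    (hxs : ∀ p ∈ xs, p.2 ≠ "" ∧ PySem.Str.strip p.2 = p.2)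
    (hv : ∀ v ∈ values, v ≠ "" ∧ PySem.Str.strip v = v)
    {v : String} (h : v ∈ collectA limit xs seenV values) :
    v ≠ "" ∧ PySem.Str.strip v = v := by
  induction xs generalizing seenV values with
  | nil => exact hv v (by simpa [collectA] using h)
  | cons hd tl ih =>
    obtain ⟨key, value⟩ := hd
    have hval := hxs (key, value) (by simp)
    have hnew : ∀ w ∈ values ++ [normalizeValue value], w ≠ "" ∧ PySem.Str.strip w = w := by
      intro w hw
      rcases List.mem_append.mp hw with hw | hw
      · exact hv w hw
      · rcases List.mem_singleton.mp hw with rfl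
        exact ⟨by simpa [normalizeValue, hval.2] using hval.1,
               by simp [normalizeValue, str_strip_idem]⟩
    simp only [collectA] at h
    split_ifs at h with h3 h4
    · exact ih _ _ (fun p hp => hxs p (List.mem_cons_of_mem _ hp)) hv h
    · exact hnew v h
    · exact ih _ _ (fun p hp => hxs p (List.mem_cons_of_mem _ hp)) hnew h

-- on a clean list _join_natural's re-filter and re-strip are the identity
theorem joinNatural_filter_clean (values : List String)
    (hv : ∀ v ∈ values, v ≠ "" ∧ PySem.Str.strip v = v) :
    (values.filter (fun p => !(p == "") && !(PySem.Str.strip p == ""))).map PySem.Str.strip = values := by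
  induction values with
  | nil => simp
  | cons v t ih =>
    have h := hv v (by simp)
    have ht := ih (fun x hx => hv x (by simp [hx]))
    simp [h.1, h.2, ht]

-- ===== VERDICT (by name: the statement is the Claim_ definition above) =====
theorem synthesize_broad_memory_spec : Claim_equal_synthesize_broad_memory := by
  intro items limit _
  unfold Spec_synthesize_broad_memory synthesize_broad_memory synthesize_broad_memory_alt
  rw [collectB_eq]
  by_cases hd : dedupePairs items PySem.Set.empty [] = []
  · rw [if_pos hd, hd]
    simp [collectA]
  · simp only [if_neg hd]
    set V := collectA limit (dedupePairs items PySem.Set.empty []) PySem.Set.empty [] with hV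
    have hclean : ∀ v ∈ V, v ≠ "" ∧ PySem.Str.strip v = v := by
      intro v hv
      exact collectA_clean limit _ _ _ (fun p hp => dedupePairs_clean items _ hp)
        (by simp) hv
    by_cases hv0 : V = []
    · simp [hv0]
    · simp only [if_neg hv0]
      by_cases h1 : V.length = 1
      · simp [h1]
      · simp only [if_neg h1]
        have hps : (V.filter (fun p => !(p == "") && !(PySem.Str.strip p == ""))).map PySem.Str.strip = V :=
          joinNatural_filter_clean V hclean
        by_cases h2 : V.length = 2
        · simp only [joinNatural, hps, if_neg hv0, if_neg h1, if_pos h2]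
          simp [String.append_assoc]
        · simp only [joinNatural, hps, if_neg hv0, if_neg h1, if_neg h2]
          simp [String.append_assoc]
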